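-- pv_equiv track=rewrite | github.com/aadityaoza/submission | candidate_generator.py | get_accidental_splits
-- ===== SOURCE A (Python) =====
-- def get_accidental_splits(query_splits):
--     words_without_splits = set()
--     if len(query_splits) >= 2:
--         for i in range(len(query_splits) - 1):
--             join = query_splits[i] + query_splits[i+1]
--             before = ""; after = ""
--             for j in range(i):
--                 before = before + query_splits[j] + " "
--             j = i + 2
--             while(j < len(query_splits)):
--                 after = after + query_splits[j] + " "
--                 j = j+1
--             final = before.strip() + " " + join.strip() + " " + after.strip()
--             if final.strip() != "":
--                 words_without_splits.add(final.strip())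
--     return words_without_splits
-- ===== SOURCE B (Python) =====
-- def get_accidental_splits(query_splits):
--     n = len(query_splits)
--     result = set()
--     if n < 2:
--         return result
--     # prefix[i] = concatenation of the first i words, each followed by a space
--     prefix = [""]
--     for w in query_splits:
--         prefix.append(prefix[-1] + w + " ")
--     # suffix[i] = concatenation of the words from i on, each followed by a space
--     suffix = [""]
--     for w in reversed(query_splits):
--         suffix.append(w + " " + suffix[-1])
--     suffix.reverse()
--     for i in range(n - 1):
--         join = query_splits[i] + query_splits[i + 1]
--         final = (prefix[i].strip() + " " + join.strip() + " " + suffix[i + 2].strip()).strip()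
--         if final != "":
--             result.add(final)
--     return result
-- ===== Notes on version B (the rewrite author's own statement) =====
-- stated objective: faster
-- what changed: Replaces the per-split-point inner rescans (a for-loop building 'before' and a while-loop building 'after' for every i) with precomputed prefix and suffix join-tables built in one pass each, then a single combining pass over the split points.
import Mathlib
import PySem

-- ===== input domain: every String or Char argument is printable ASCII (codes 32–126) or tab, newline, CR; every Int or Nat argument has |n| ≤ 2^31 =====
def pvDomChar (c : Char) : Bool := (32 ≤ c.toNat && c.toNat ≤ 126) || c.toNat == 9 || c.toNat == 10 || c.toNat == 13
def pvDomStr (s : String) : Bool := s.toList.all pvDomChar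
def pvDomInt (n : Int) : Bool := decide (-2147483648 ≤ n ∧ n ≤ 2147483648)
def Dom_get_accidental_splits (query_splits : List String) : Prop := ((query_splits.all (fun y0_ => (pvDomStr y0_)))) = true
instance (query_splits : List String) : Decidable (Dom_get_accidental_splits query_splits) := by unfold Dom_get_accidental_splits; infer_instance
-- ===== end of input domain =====

-- B replaces A's per-split-point inner rescans with precomputed prefix/suffix join-tables
-- built in one pass each, plus a single combining pass (objective: faster).

-- ===== PORT A =====
def get_accidental_splits (query_splits : List String) : List String :=
  let n : Int := query_splits.length
  if 2 ≤ n then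
    (PySem.List.pyRange 0 (n - 1) 1).foldl (fun ws i =>
      let join := PySem.List.pyGetD query_splits i "" ++ PySem.List.pyGetD query_splits (i + 1) ""
      let before := (PySem.List.pyRange 0 i 1).foldl
        (fun b j => b ++ PySem.List.pyGetD query_splits j "" ++ " ") ""
      -- the 'while j < len(query_splits)' loop with j starting at i+2 and j += 1
      let after := (PySem.List.pyRange (i + 2) n 1).foldl
        (fun a j => a ++ PySem.List.pyGetD query_splits j "" ++ " ") ""
      let final := PySem.Str.strip before ++ " " ++ PySem.Str.strip join ++ " " ++ PySem.Str.strip after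
      if PySem.Str.strip final ≠ "" then PySem.Set.add ws (PySem.Str.strip final) else ws)
      PySem.Set.empty
  else PySem.Set.empty

-- ===== PORT B =====
-- prefix table: prefix[0] = "", prefix[k] = prefix[k-1] ++ word ++ " "  (Source B's first loop)
def pvPrefTab (acc : String) : List String → List String
  | [] => [acc]
  | w :: ws => acc :: pvPrefTab (acc ++ w ++ " ") ws

-- suffix table: suffix[n] = "", suffix[k] = word ++ " " ++ suffix[k+1]  (Source B's reversed loop)
def pvSufTab : List String → List String
  | [] => [""]
  | w :: ws => (w ++ " " ++ (pvSufTab ws).headD "") :: pvSufTab ws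

def get_accidental_splits_alt (query_splits : List String) : List String :=
  let n : Int := query_splits.length
  if n < 2 then PySem.Set.empty
  else
    let prefTab := pvPrefTab "" query_splits
    let sufTab := pvSufTab query_splits
    (PySem.List.pyRange 0 (n - 1) 1).foldl (fun res i =>
      let join := PySem.List.pyGetD query_splits i "" ++ PySem.List.pyGetD query_splits (i + 1) ""
      let final := PySem.Str.strip
        (PySem.Str.strip (PySem.List.pyGetD prefTab i "") ++ " " ++ PySem.Str.strip join ++ " " ++
         PySem.Str.strip (PySem.List.pyGetD sufTab (i + 2) ""))
      if final ≠ "" then PySem.Set.add res final else res)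
      PySem.Set.empty

-- ===== PRECONDITION & SPEC =====
def Spec_get_accidental_splits (query_splits : List String) (out : List String) : Prop := out = get_accidental_splits_alt query_splits
instance (query_splits : List String) (out : List String) : Decidable (Spec_get_accidental_splits query_splits out) := by unfold Spec_get_accidental_splits; infer_instance

-- ===== CLAIM (what is proved, stated in full; the proofs are below) =====
def Claim_equal_get_accidental_splits : Prop := ∀ (query_splits : List String), Dom_get_accidental_splits query_splits → Spec_get_accidental_splits query_splits (get_accidental_splits query_splits)

-- ===== LEMMAS AND PROOFS =====

theorem pvPrefTab_length (l : List String) (a : String) : (pvPrefTab a l).length = l.length + 1 := by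
  induction l generalizing a with
  | nil => simp [pvPrefTab]
  | cons w ws ih => simp [pvPrefTab, ih]

theorem pvSufTab_length (l : List String) : (pvSufTab l).length = l.length + 1 := by
  induction l with
  | nil => simp [pvSufTab]
  | cons w ws ih => simp [pvSufTab, ih]

-- folding words left-to-right with trailing spaces, in foldr form
theorem pvFoldl_eq_foldr (l : List String) (acc : String) :
    l.foldl (fun a w => a ++ w ++ " ") acc
      = acc ++ l.foldr (fun w a => w ++ " " ++ a) "" := by
  induction l generalizing acc with
  | nil => simp [String.append_empty]
  | cons w ws ih =>
      rw [List.foldl_cons, ih]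
      simp [String.append_assoc]

-- the k-th entry of the prefix table is the fold of the first k words
theorem pvPrefTab_getD (qs : List String) (acc : String) (k : Nat) (hk : k ≤ qs.length) :
    (pvPrefTab acc qs).getD k ""
      = (qs.take k).foldl (fun b w => b ++ w ++ " ") acc := by
  induction qs generalizing acc k with
  | nil =>
      have hk0 : k = 0 := by simpa using hk
      subst hk0; simp [pvPrefTab]
  | cons w ws ih =>
      cases k with
      | zero => simp [pvPrefTab]
      | succ k =>
          simp only [pvPrefTab, List.getD_cons_succ, List.take_succ_cons, List.foldl_cons]
          exact ih _ k (by simpa using hk)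

-- the k-th entry of the suffix table is the foldr of the words from k on
theorem pvSufTab_getD (qs : List String) (k : Nat) (hk : k ≤ qs.length) :
    (pvSufTab qs).getD k ""
      = (qs.drop k).foldr (fun w a => w ++ " " ++ a) "" := by
  induction qs generalizing k with
  | nil =>
      have hk0 : k = 0 := by simpa using hk
      subst hk0; simp [pvSufTab]
  | cons w ws ih =>
      cases k with
      | zero =>
          simp only [pvSufTab, List.getD_cons_zero, List.drop_zero, List.foldr_cons]
          congr 1
          cases ws with
          | nil => simp [pvSufTab]
          | cons v vs =>
              have := ih 0 (by simp)
              simpa [pvSufTab] using this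
      | succ k =>
          simp only [pvSufTab, List.getD_cons_succ, List.drop_succ_cons]
          exact ih k (by simpa using hk)

-- A's inner 'before' loop equals the fold of the first i words
theorem pvBefore_eq (qs : List String) (i : Int) (h0 : 0 ≤ i) (h1 : i ≤ qs.length) :
    (PySem.List.pyRange 0 i 1).foldl
        (fun b j => b ++ PySem.List.pyGetD qs j "" ++ " ") ""
      = (qs.take i.toNat).foldl (fun b w => b ++ w ++ " ") "" := by
  have hlen : (((qs.take i.toNat).length : Nat) : Int) = i := by
    simp [List.length_take]; omega
  have hcongr : (PySem.List.pyRange 0 i 1).foldl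
        (fun b j => b ++ PySem.List.pyGetD qs j "" ++ " ") ""
      = (PySem.List.pyRange 0 ((qs.take i.toNat).length : Int) 1).foldl
        (fun b j => b ++ PySem.List.pyGetD (qs.take i.toNat) j "" ++ " ") "" := by
    rw [hlen]
    refine PySem.List.foldl_congr_mem _ _ _ _ (fun b j hj => ?_)
    rw [PySem.List.mem_pyRange_one] at hj
    rw [PySem.List.pyGetD_eq_getElem qs "" hj.1 (by omega),
        PySem.List.pyGetD_eq_getElem (qs.take i.toNat) "" hj.1
          (by simp [List.length_take]; omega)]
    rw [List.getElem_take]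
  rw [hcongr]
  exact PySem.List.foldl_pyRange_zero_pyGetD' (qs.take i.toNat) "" (fun b w => b ++ w ++ " ") ""

theorem get_accidental_splits_eq (qs : List String) :
    get_accidental_splits qs = get_accidental_splits_alt qs := by
  unfold get_accidental_splits get_accidental_splits_alt
  by_cases h2 : 2 ≤ (qs.length : Int)
  · dsimp only
    rw [if_pos h2, if_neg (by omega : ¬ ((qs.length : Int) < 2))]
    refine PySem.List.foldl_congr_mem _ _ _ _ (fun res i hi => ?_)
    rw [PySem.List.mem_pyRange_one] at hi
    obtain ⟨h0, hlt⟩ := hi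
    have hiN : i.toNat ≤ qs.length := by omega
    have hpref : PySem.List.pyGetD (pvPrefTab "" qs) i ""
        = (qs.take i.toNat).foldl (fun b w => b ++ w ++ " ") "" := by
      have hP : i.toNat < (pvPrefTab "" qs).length := by rw [pvPrefTab_length]; omega
      calc PySem.List.pyGetD (pvPrefTab "" qs) i ""
          = (pvPrefTab "" qs)[i.toNat] :=
            PySem.List.pyGetD_eq_getElem _ "" h0 (by rw [pvPrefTab_length]; push_cast; omega)
        _ = (pvPrefTab "" qs).getD i.toNat "" := (List.getD_eq_getElem _ "" hP).symm
        _ = _ := pvPrefTab_getD qs "" i.toNat hiN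
    have hsuf : PySem.List.pyGetD (pvSufTab qs) (i + 2) ""
        = (qs.drop (i + 2).toNat).foldr (fun w a => w ++ " " ++ a) "" := by
      have hS : (i + 2).toNat < (pvSufTab qs).length := by rw [pvSufTab_length]; omega
      calc PySem.List.pyGetD (pvSufTab qs) (i + 2) ""
          = (pvSufTab qs)[(i + 2).toNat] :=
            PySem.List.pyGetD_eq_getElem _ "" (by omega) (by rw [pvSufTab_length]; push_cast; omega)
        _ = (pvSufTab qs).getD (i + 2).toNat "" := (List.getD_eq_getElem _ "" hS).symm
        _ = _ := pvSufTab_getD qs (i + 2).toNat (by omega)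
    have hafter : (PySem.List.pyRange (i + 2) (qs.length : Int) 1).foldl
        (fun a j => a ++ PySem.List.pyGetD qs j "" ++ " ") ""
      = (qs.drop (i + 2).toNat).foldl (fun a w => a ++ w ++ " ") "" :=
      PySem.List.foldl_pyRange_pyGetD' qs "" (fun a w => a ++ w ++ " ") "" (by omega)
    rw [pvBefore_eq qs i h0 (by omega), hafter, hpref, hsuf, pvFoldl_eq_foldr,
        pvFoldl_eq_foldr]
    simp [String.empty_append]
  · dsimp only
    rw [if_neg h2, if_pos (by omega : (qs.length : Int) < 2)]

-- ===== VERDICT (by name: the statement is the Claim_ definition above) =====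
theorem get_accidental_splits_spec : Claim_equal_get_accidental_splits := by
  intro qs _
  unfold Spec_get_accidental_splits
  exact get_accidental_splits_eq qs
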